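-- pv_equiv track=rewrite | github.com/ShuvalovAnthony/ez_python | Katia/24/25361/25361.py | find_max_poss_len
-- ===== SOURCE A (Python) =====
-- def find_max_poss_len(substr: str):
--     left_f_index = substr.index("F")
--     for i in range(left_f_index, len(substr)):
--         if substr[i] == "0":
--             return 0
--
--     left_part_before_first_f = substr[:left_f_index]
--     if "0" not in left_part_before_first_f:
--         return 0
--
--     left_part_valid_len = 0
--     for i in range(len(left_part_before_first_f) - 1, -1, -1):
--         if left_part_before_first_f[i] != '0':
--             left_part_valid_len += 1
--         else:
--             return left_part_valid_len + 1 + len(substr) - substr.index("F")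
-- ===== SOURCE B (Python) =====
-- def find_max_poss_len(substr: str):
--     seen_f = False
--     last_zero = -1
--     for i, c in enumerate(substr):
--         if c == "F" and not seen_f:
--             seen_f = True
--         elif c == "0":
--             if seen_f:
--                 return 0
--             last_zero = i
--     if not seen_f:
--         raise ValueError("substring not found")
--     if last_zero == -1:
--         return 0
--     return len(substr) - last_zero
-- ===== Notes on version B (the rewrite author's own statement) =====
-- stated objective: alternative
-- what changed: Replaces A's three staged passes (index('F'), a forward scan after it, a membership test and a backward counting loop over the prefix) by a single forward enumerate pass with a two-field state machine (seen_f flag, last zero index before the first 'F') and the closed form len(substr) - last_zero.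
import Mathlib
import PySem

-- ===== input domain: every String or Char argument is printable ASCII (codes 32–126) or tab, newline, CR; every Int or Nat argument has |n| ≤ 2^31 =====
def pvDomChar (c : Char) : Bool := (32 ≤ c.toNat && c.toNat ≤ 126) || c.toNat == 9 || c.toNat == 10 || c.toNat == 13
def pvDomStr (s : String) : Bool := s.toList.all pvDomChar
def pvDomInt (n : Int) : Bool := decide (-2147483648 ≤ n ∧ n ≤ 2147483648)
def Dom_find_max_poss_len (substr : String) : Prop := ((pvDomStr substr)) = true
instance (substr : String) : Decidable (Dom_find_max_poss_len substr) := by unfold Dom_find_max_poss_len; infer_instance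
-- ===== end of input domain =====

-- B replaces A's staged passes (index, forward scan, membership test, backward counting loop)
-- by one forward enumerate pass with a (seen_f, last_zero) state machine (objective: alternative).

-- ===== PORT A =====
-- the forward 'for i in range(f, len(substr)): if substr[i] == "0": return 0' loop
def pvAscanC : List Char → Option Int
  | [] => none
  | c :: rest => if c == '0' then some 0 else pvAscanC rest

-- the backward 'for i in range(len(left)-1, -1, -1)' loop with accumulator left_part_valid_len
def pvBackC : List Char → Nat → Option Nat
  | [], _ => none
  | c :: rest, acc => if c != '0' then pvBackC rest (acc + 1) else some acc

def find_max_poss_len (substr : String) : Int :=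
  let cs := substr.toList
  let f := PySem.Chars.find cs ['F']  -- substr.index("F"); Pre_ excludes the ValueError case 'F' ∉ substr
  match pvAscanC ((PySem.List.pyRange f (PySem.List.len cs) 1).map (fun i => PySem.List.pyGetD cs i ' ')) with
  | some r => r
  | none =>
    let left := PySem.Chars.slice cs none (some f)  -- substr[:left_f_index]
    if PySem.Chars.isIn ['0'] left = false then 0
    else
      match pvBackC ((PySem.List.pyRange ((PySem.List.len left) - 1) (-1) (-1)).map (fun i => PySem.List.pyGetD left i ' ')) 0 with
      | some acc => (acc : Int) + 1 + (PySem.List.len cs) - PySem.Chars.find cs ['F']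
      | none => 0  -- unreachable: "0" ∈ left guarantees the loop returns

-- ===== PORT B =====
-- the 'for i, c in enumerate(substr)' loop; state = (seen_f, last_zero); none = 'return 0'
def pvBloop : List (Int × Char) → Bool → Int → Option (Bool × Int)
  | [], sf, lz => some (sf, lz)
  | (i, c) :: rest, sf, lz =>
    if c == 'F' && !sf then pvBloop rest true lz
    else if c == '0' then
      (if sf then none else pvBloop rest sf i)
    else pvBloop rest sf lz

def find_max_poss_len_alt (substr : String) : Int :=
  let cs := substr.toList
  match pvBloop (PySem.List.enumerate cs 0) false (-1) with
  | none => 0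
  | some (sf, lz) =>
    if !sf then 0  -- here the Python raises ValueError; outside Pre_
    else if lz == -1 then 0
    else (PySem.List.len cs) - lz

-- ===== PRECONDITION & SPEC =====
-- Pre_ excludes exactly the inputs without 'F', on which Python's substr.index("F") raises ValueError (in both A and B).
def Pre_find_max_poss_len (substr : String) : Prop := PySem.Str.isIn "F" substr = true
instance (substr : String) : Decidable (Pre_find_max_poss_len substr) := by unfold Pre_find_max_poss_len; infer_instance
def pvWitness_find_max_poss_len : String := "0F"

def Spec_find_max_poss_len (substr : String) (out : Int) : Prop := out = find_max_poss_len_alt substr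
instance (substr : String) (out : Int) : Decidable (Spec_find_max_poss_len substr out) := by unfold Spec_find_max_poss_len; infer_instance

-- ===== CLAIM (what is proved, stated in full; the proofs are below) =====
def Claim_equal_find_max_poss_len : Prop := ∀ (substr : String), Dom_find_max_poss_len substr → Pre_find_max_poss_len substr → Spec_find_max_poss_len substr (find_max_poss_len substr)

-- ===== LEMMAS AND PROOFS =====

theorem pvAscanC_spec (l : List Char) : pvAscanC l = if '0' ∈ l then some 0 else none := by
  induction l with
  | nil => simp [pvAscanC]
  | cons c rest ih =>
    by_cases h : c = '0'
    · subst h; simp [pvAscanC]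
    · simp [pvAscanC, ih, h, Ne.symm h]

theorem pvBackC_acc (l : List Char) (acc : Nat) :
    pvBackC l acc = (pvBackC l 0).map (· + acc) := by
  induction l generalizing acc with
  | nil => simp [pvBackC]
  | cons c rest ih =>
    by_cases h : c = '0'
    · subst h; simp [pvBackC]
    · simp only [pvBackC]
      rw [if_pos (by simp [h]), if_pos (by simp [h]), ih (acc + 1), ih 1, Option.map_map]
      congr 1; funext k; simp; omega

theorem pvBloop_append (xs ys : List (Int × Char)) (sf : Bool) (lz : Int) :
    pvBloop (xs ++ ys) sf lz =
      match pvBloop xs sf lz with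
      | none => none
      | some (sf', lz') => pvBloop ys sf' lz' := by
  induction xs generalizing sf lz with
  | nil => simp [pvBloop]
  | cons p rest ih =>
    obtain ⟨i, c⟩ := p
    simp only [List.cons_append, pvBloop]
    split_ifs <;> simp [ih]

-- post-F phase: seen_f is set, any '0' returns 0, nothing else changes the state
theorem pvBloop_true (l : List (Int × Char)) (lz : Int) :
    pvBloop l true lz = if '0' ∈ l.map Prod.snd then none else some (true, lz) := by
  induction l with
  | nil => simp [pvBloop]
  | cons p rest ih =>
    obtain ⟨i, c⟩ := p
    by_cases h : c = '0'
    · subst h; simp [pvBloop]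
    · simp only [pvBloop, ih]
      rw [if_neg (by simp : ¬((c == 'F') && !true) = true), if_neg (by simp [h] : ¬(c == '0') = true)]
      by_cases hm : '0' ∈ List.map Prod.snd rest
      · simp [hm]
      · simp [hm, Ne.symm h]

-- pre-F phase over a prefix p without 'F', joint with A's backward counting loop on p.reverse
theorem pvBloop_false (p : List Char) (hF : 'F' ∉ p) :
    ∀ (k lz : Int),
    ('0' ∉ p → pvBloop (PySem.List.enumerate p k) false lz = some (false, lz)) ∧
    ('0' ∈ p → ∃ j : Nat, j + 1 ≤ p.length ∧ pvBackC p.reverse 0 = some j ∧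
        pvBloop (PySem.List.enumerate p k) false lz = some (false, k + p.length - 1 - j)) := by
  induction p using List.reverseRecOn with
  | nil =>
    intro k lz
    exact ⟨fun _ => by simp [PySem.List.enumerate_nil, pvBloop], fun h => absurd h (by simp)⟩
  | append_singleton ys c ih =>
    intro k lz
    have hcF : c ≠ 'F' := by simp at hF; tauto
    have hysF : 'F' ∉ ys := by simp at hF; tauto
    have henum : PySem.List.enumerate (ys ++ [c]) k
        = PySem.List.enumerate ys k ++ [(k + ys.length, c)] := by
      rw [PySem.List.enumerate_append]
      simp [PySem.List.enumerate_cons, PySem.List.enumerate_nil]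
    constructor
    · intro hno
      have hc : c ≠ '0' := by simp at hno; tauto
      have hys : '0' ∉ ys := by simp at hno; tauto
      rw [henum, pvBloop_append, (ih hysF k lz).1 hys]
      simp [pvBloop, hcF, hc]
    · intro hmem
      by_cases hc : c = '0'
      · subst hc
        refine ⟨0, by simp, ?_, ?_⟩
        · rw [List.reverse_append]; simp [pvBackC]
        · have hsome : ∃ lz', pvBloop (PySem.List.enumerate ys k) false lz = some (false, lz') := by
            by_cases hys : '0' ∈ ys
            · obtain ⟨j, _, _, hl⟩ := (ih hysF k lz).2 hys; exact ⟨_, hl⟩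
            · exact ⟨lz, (ih hysF k lz).1 hys⟩
          obtain ⟨lz', hl⟩ := hsome
          rw [henum, pvBloop_append, hl]
          simp [pvBloop]
          ring
      · have hys : '0' ∈ ys := by simp at hmem; tauto
        obtain ⟨j, hj, hback, hloop⟩ := (ih hysF k lz).2 hys
        refine ⟨j + 1, by simp; omega, ?_, ?_⟩
        · rw [List.reverse_append]
          simp only [List.reverse_cons, List.reverse_nil, List.nil_append, List.singleton_append,
            pvBackC]
          rw [if_pos (by simp [hc]), pvBackC_acc, hback]
          rfl
        · rw [henum, pvBloop_append, hloop]
          simp only [pvBloop]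
          rw [if_neg (by simp [hcF] : ¬((c == 'F') && !false) = true),
              if_neg (by simp [hc] : ¬(c == '0') = true)]
          congr 1
          ext
          · rfl
          · simp
            ring

theorem isIn_zero_iff (xs : List Char) : PySem.Chars.isIn ['0'] xs = true ↔ '0' ∈ xs := by
  rw [PySem.Chars.isIn_iff_infix]
  constructor
  · intro h; exact h.mem (by simp)
  · intro h
    obtain ⟨a, b, rfl⟩ := List.append_of_mem h
    exact ⟨a, b, by simp⟩

-- ===== VERDICT (by name: the statement is the Claim_ definition above) =====
theorem find_max_poss_len_spec : Claim_equal_find_max_poss_len := by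
  intro substr _ hpre
  unfold Spec_find_max_poss_len find_max_poss_len find_max_poss_len_alt
  dsimp only
  set cs := substr.toList with hcs
  have hpre' : PySem.Chars.isIn ['F'] cs = true := by
    have h := hpre; unfold Pre_find_max_poss_len at h
    simpa using h
  have hf0 : 0 ≤ PySem.Chars.find cs ['F'] :=
    (PySem.Chars.find_nonneg_iff _ _).mpr ((PySem.Chars.isIn_iff_infix _ _).mp hpre')
  set f := PySem.Chars.find cs ['F'] with hfdef
  obtain ⟨fn, hfn⟩ : ∃ fn : Nat, f = (fn : Int) := ⟨f.toNat, (Int.toNat_of_nonneg hf0).symm⟩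
  obtain ⟨hp, hmin⟩ := PySem.Chars.find_spec (s := cs) (sub := ['F']) hf0
  rw [← hfdef, hfn] at hp hmin
  simp only [Int.toNat_natCast] at hp hmin
  obtain ⟨rest, hrest⟩ : ∃ rest, List.drop fn cs = 'F' :: rest := by
    obtain ⟨t, ht⟩ := hp
    exact ⟨t, ht.symm⟩
  have hflt : fn < cs.length := by
    have := congrArg List.length hrest
    simp at this
    omega
  set left := List.take fn cs with hleft
  have hL : left.length = fn := by simp [hleft]; omega
  have hFleft : 'F' ∉ left := by
    intro hmem
    obtain ⟨i, hi, hgi⟩ := List.getElem_of_mem hmem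
    have hiL : i < fn := by omega
    have hgc : cs[i]'(by omega) = 'F' := by
      rw [← hgi]; simp [hleft]
    exact hmin i hiL ⟨List.drop (i + 1) cs, by
      rw [List.singleton_append, ← hgc, ← List.drop_eq_getElem_cons]⟩
  have hsplit : cs = left ++ 'F' :: rest := by
    rw [hleft, ← hrest, List.take_append_drop]
  have hslice_to : PySem.Chars.slice cs none (some f) = left := by
    rw [hfn]; simp [PySem.Chars.slice_eq_listSlice, PySem.List.slice_to_natCast, hleft]
  have hmap1 : (PySem.List.pyRange f (PySem.List.len cs) 1).map (fun i => PySem.List.pyGetD cs i ' ')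
      = List.drop fn cs := by
    rw [PySem.List.map_pyGetD_pyRange cs ' ' hf0, hfn]
    simp
  have henumsplit : PySem.List.enumerate cs 0
      = PySem.List.enumerate left 0 ++ ((fn : Int), 'F') :: PySem.List.enumerate rest (fn + 1) := by
    conv_lhs => rw [hsplit]
    rw [PySem.List.enumerate_append, PySem.List.enumerate_cons]
    simp [hL]
  rw [hmap1, pvAscanC_spec, hslice_to, hrest, henumsplit, pvBloop_append]
  by_cases hzl : '0' ∈ left
  · obtain ⟨j, hj, hback, hloop⟩ := (pvBloop_false left hFleft 0 (-1)).2 hzl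
    rw [hloop]
    simp only [pvBloop, if_pos (by simp : ((('F' : Char) == 'F') && !false) = true)]
    rw [pvBloop_true, PySem.List.map_snd_enumerate]
    by_cases hzr : '0' ∈ rest
    · rw [if_pos (by simp [hzr] : '0' ∈ 'F' :: rest), if_pos hzr]
    · rw [if_neg (by simp [hzr] : ¬ '0' ∈ 'F' :: rest), if_neg hzr]
      dsimp only
      rw [if_neg (by simp [isIn_zero_iff, hzl])]
      have hmap2 : (PySem.List.pyRange ((PySem.List.len left) - 1) (-1) (-1)).map
          (fun i => PySem.List.pyGetD left i ' ') = left.reverse := by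
        rw [PySem.List.pyRange_neg_one_eq_reverse ((PySem.List.len left) - 1) (-1),
            show (-1 : Int) + 1 = 0 from rfl,
            show (PySem.List.len left : Int) - 1 + 1 = PySem.List.len left from by ring,
            List.map_reverse, PySem.List.map_pyGetD_pyRange_zero]
      rw [hmap2, hback]
      dsimp only
      rw [if_neg (show ¬((!true) = true) from by simp),
          if_neg (show ¬(((0 : Int) + left.length - 1 - j == -1) = true) from by simp; omega)]
      rw [hfn]
      simp only [PySem.List.len_eq, hL]
      omega
  · have hloop := (pvBloop_false left hFleft 0 (-1)).1 hzl
    rw [hloop]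
    simp only [pvBloop, if_pos (by simp : ((('F' : Char) == 'F') && !false) = true)]
    rw [pvBloop_true, PySem.List.map_snd_enumerate]
    by_cases hzr : '0' ∈ rest
    · rw [if_pos (by simp [hzr] : '0' ∈ 'F' :: rest), if_pos hzr]
    · rw [if_neg (by simp [hzr] : ¬ '0' ∈ 'F' :: rest), if_neg hzr]
      dsimp only
      rw [if_pos (by rw [← Bool.not_eq_true]; simp [isIn_zero_iff, hzl])]
      simp
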